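-- pv_equiv track=rewrite | github.com/mieumje/Python_Coding_Test | Level1_Programmers/이상한 문자 만들기.py | solution
-- ===== SOURCE A (Python) =====
-- def solution(s):
--     answer = ''
--     tmpArr = s.split(" ")
--     for i in tmpArr:
--         for x in range(0,len(i)):
--             if(x%2 == 0): answer += i[x].upper()
--             else: answer += i[x]
--         answer += " "
--     answer = answer[:-1]
--     return answer
-- ===== SOURCE B (Python) =====
-- def solution(s):
--     out = []
--     k = 0
--     for c in s:
--         if c == ' ':
--             out.append(c)
--             k = 0
--         else:
--             out.append(c.upper() if k % 2 == 0 else c)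
--             k += 1
--     return ''.join(out)
-- ===== Notes on version B (the rewrite author's own statement) =====
-- stated objective: simpler
-- what changed: Replaced split-into-words + nested index loop + trailing-space-slice fixup by one linear pass over the characters that tracks the word-relative position in a counter reset at each space.
import Mathlib
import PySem

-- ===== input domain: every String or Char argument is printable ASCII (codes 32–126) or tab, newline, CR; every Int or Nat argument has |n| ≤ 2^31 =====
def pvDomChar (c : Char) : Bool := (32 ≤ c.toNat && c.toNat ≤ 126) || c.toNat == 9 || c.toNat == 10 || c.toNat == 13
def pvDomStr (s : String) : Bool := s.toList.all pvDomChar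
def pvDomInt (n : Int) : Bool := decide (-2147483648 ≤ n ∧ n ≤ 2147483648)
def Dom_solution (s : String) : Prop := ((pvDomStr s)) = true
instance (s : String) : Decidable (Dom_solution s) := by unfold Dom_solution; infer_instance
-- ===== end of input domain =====

-- B replaces A's split-into-words + nested index loop + trailing-space slice by one
-- linear pass with a word-relative counter reset at each space (objective: simpler).

-- ===== PORT A =====
-- s.split(" ") with the literal non-empty separator " " is PySem.Chars.splitOn · [' '].
def solution (s : String) : String :=
  let tmpArr := PySem.Chars.splitOn s.toList [' ']
  let answer : List Char := tmpArr.foldl (fun answer i =>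
    ((PySem.List.pyRange 0 (PySem.List.len i) 1).foldl (fun a x =>
        if PySem.Int.mod x 2 == 0 then a ++ [PySem.Chars.upperChar (PySem.List.pyGetD i x ' ')]
        else a ++ [PySem.List.pyGetD i x ' ']) answer) ++ [' ']) []
  String.mk (PySem.List.slice answer none (some (-1)))

-- ===== PORT B =====
def solution_alt (s : String) : String :=
  let step : (List Char × Int) → Char → (List Char × Int) := fun st c =>
    if c == ' ' then (st.1 ++ [c], 0)
    else (st.1 ++ [if PySem.Int.mod st.2 2 == 0 then PySem.Chars.upperChar c else c], st.2 + 1)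
  String.mk (s.toList.foldl step ([], 0)).1

-- ===== PRECONDITION & SPEC =====
def Spec_solution (s : String) (out : String) : Prop := out = solution_alt s
instance (s : String) (out : String) : Decidable (Spec_solution s out) := by unfold Spec_solution; infer_instance

-- ===== CLAIM (what is proved, stated in full; the proofs are below) =====
def Claim_equal_solution : Prop := ∀ (s : String), Dom_solution s → Spec_solution s (solution s)

-- ===== LEMMAS AND PROOFS =====

/-- The common specification: transform a char stream, tracking the word-relative
position `k`, resetting at each space. -/
def gRec : List Char → Nat → List Char
  | [], _ => []
  | c :: cs, k =>
    if c = ' ' then ' ' :: gRec cs 0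
    else (if k % 2 = 0 then PySem.Chars.upperChar c else c) :: gRec cs (k + 1)

/-- Recursive description of splitting on a single space. -/
def splitSp : List Char → List (List Char)
  | [] => [[]]
  | c :: cs =>
    if c = ' ' then [] :: splitSp cs
    else match splitSp cs with
      | [] => [[c]]
      | w :: ws => (c :: w) :: ws

def consHead (p : List Char) : List (List Char) → List (List Char)
  | [] => [p]
  | w :: ws => (p ++ w) :: ws

/-- A's inner per-word loop, positionally. -/
def twRec : List Char → Nat → List Char
  | [], _ => []
  | c :: cs, k => (if k % 2 = 0 then PySem.Chars.upperChar c else c) :: twRec cs (k + 1)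

/-- A's outer loop over the words. -/
def joinTw : List (List Char) → List Char
  | [] => []
  | w :: ws => twRec w 0 ++ ' ' :: joinTw ws

lemma splitSp_ne_nil (cs : List Char) : splitSp cs ≠ [] := by
  cases cs with
  | nil => simp [splitSp]
  | cons c cs =>
    simp only [splitSp]
    split
    · simp
    · split <;> simp

lemma go_spec (fuel : Nat) : ∀ (l : List Char), l.length ≤ fuel → ∀ cur acc,
    PySem.Chars.splitOn.go [' '] (fuel + 1) l cur acc
      = acc.reverse ++ consHead cur.reverse (splitSp l) := by
  induction fuel with
  | zero =>
    intro l hl cur acc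
    interval_cases hl' : l.length
    rw [List.length_eq_zero_iff] at hl'
    subst hl'
    simp [PySem.Chars.splitOn.go, splitSp, consHead]
  | succ fuel ih =>
    intro l hl cur acc
    cases l with
    | nil => simp [PySem.Chars.splitOn.go, splitSp, consHead]
    | cons c rest =>
      by_cases hc : c = ' '
      · subst hc
        have : PySem.Chars.splitOn.go [' '] (fuel + 1 + 1) (' ' :: rest) cur acc
            = PySem.Chars.splitOn.go [' '] (fuel + 1) rest [] (cur.reverse :: acc) := by
          simp [PySem.Chars.splitOn.go]
        rw [this, ih rest (by simpa using hl)]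
        obtain ⟨w, ws, hw⟩ := List.exists_cons_of_ne_nil (splitSp_ne_nil rest)
        simp [splitSp, hw, consHead]
      · have : PySem.Chars.splitOn.go [' '] (fuel + 1 + 1) (c :: rest) cur acc
            = PySem.Chars.splitOn.go [' '] (fuel + 1) rest (c :: cur) acc := by
          simp [PySem.Chars.splitOn.go, List.isPrefixOf, Ne.symm hc]
        rw [this, ih rest (by simpa using hl)]
        obtain ⟨w, ws, hw⟩ := List.exists_cons_of_ne_nil (splitSp_ne_nil rest)
        simp [splitSp, hw, hc, consHead]

lemma splitOn_eq_splitSp (cs : List Char) :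
    PySem.Chars.splitOn cs [' '] = splitSp cs := by
  show PySem.Chars.splitOn.go [' '] (cs.length + 1) cs [] [] = splitSp cs
  rw [go_spec cs.length cs le_rfl]
  obtain ⟨w, ws, hw⟩ := List.exists_cons_of_ne_nil (splitSp_ne_nil cs)
  simp [hw, consHead]

lemma modTwo_beq (n : Nat) : (PySem.Int.mod (n : Int) 2 == 0) = (n % 2 == 0) := by
  rw [show (2 : Int) = ((2 : Nat) : Int) from rfl, PySem.Int.mod_natCast]
  rcases Nat.mod_two_eq_zero_or_one n with h | h <;> simp [h]

/-- A's inner index loop computes `twRec` of the remaining suffix. -/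
lemma inner_loop (w : List Char) (n : Nat) : ∀ (j : Nat), j + n = w.length → ∀ (a : List Char),
    (PySem.List.pyRange (j : Int) (PySem.List.len w) 1).foldl (fun a x =>
        if PySem.Int.mod x 2 == 0 then a ++ [PySem.Chars.upperChar (PySem.List.pyGetD w x ' ')]
        else a ++ [PySem.List.pyGetD w x ' ']) a
      = a ++ twRec (w.drop j) j := by
  induction n with
  | zero =>
    intro j hj a
    have h1 : PySem.List.pyRange (j : Int) ((w.length : Nat) : Int) 1 = [] := by
      simp [PySem.List.pyRange, ← hj]
    simp only [PySem.List.len_eq, h1, List.foldl_nil]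
    rw [List.drop_eq_nil_of_le (by omega)]
    simp [twRec]
  | succ n ih =>
    intro j hj a
    have hjlt : j < w.length := by omega
    have h1 : PySem.List.pyRange (j : Int) (PySem.List.len w) 1
        = (j : Int) :: PySem.List.pyRange ((j : Int) + 1) (PySem.List.len w) 1 := by
      rw [PySem.List.pyRange_one_cons]
      simp [PySem.List.len_eq]; exact_mod_cast hjlt
    have h2 : ((j : Int) + 1) = ((j + 1 : Nat) : Int) := by push_cast; ring
    have h3 : PySem.List.pyGetD w (j : Int) ' ' = w[j] := by
      simp [PySem.List.pyGetD_natCast, List.getD_eq_getElem?_getD, hjlt]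
    have h4 : w.drop j = w[j] :: w.drop (j + 1) := List.drop_eq_getElem_cons hjlt
    rw [h1]
    simp only [List.foldl_cons, h2, h3, modTwo_beq]
    rw [ih (j + 1) (by omega)]
    rw [h4]
    by_cases hpar : j % 2 = 0 <;> simp [hpar, twRec]

/-- A's outer loop over the words builds `joinTw`. -/
lemma outer_loop : ∀ (ws : List (List Char)) (a : List Char),
    ws.foldl (fun answer i =>
      ((PySem.List.pyRange 0 (PySem.List.len i) 1).foldl (fun a x =>
          if PySem.Int.mod x 2 == 0 then a ++ [PySem.Chars.upperChar (PySem.List.pyGetD i x ' ')]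
          else a ++ [PySem.List.pyGetD i x ' ']) answer) ++ [' ']) a
      = a ++ joinTw ws := by
  intro ws
  induction ws with
  | nil => simp [joinTw]
  | cons w ws ih =>
    intro a
    simp only [List.foldl_cons]
    have hinner := inner_loop w w.length 0 (by omega) a
    rw [Nat.cast_zero, List.drop_zero] at hinner
    rw [hinner, ih]
    simp [joinTw]

/-- The head word continues the current count `k`; tail words restart at 0. -/
lemma joinTw_splitSp (cs : List Char) : ∀ (k : Nat) (w : List Char) (ws : List (List Char)),
    splitSp cs = w :: ws → twRec w k ++ ' ' :: joinTw ws = gRec cs k ++ [' '] := by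
  induction cs with
  | nil =>
    intro k w ws h
    simp only [splitSp] at h
    cases h
    simp [twRec, joinTw, gRec]
  | cons c cs ih =>
    intro k w ws h
    obtain ⟨w', ws', hw⟩ := List.exists_cons_of_ne_nil (splitSp_ne_nil cs)
    by_cases hc : c = ' '
    · subst hc
      simp only [splitSp] at h
      cases h
      have h2 := ih 0 w' ws' hw
      simp [twRec, joinTw, gRec, hw, h2]
    · simp only [splitSp, if_neg hc, hw] at h
      injection h with h1 h2
      subst h1
      subst h2
      have h3 := ih (k + 1) _ _ hw
      simp [twRec, gRec, hc, h3]

/-- B's fold maintains the output built so far and the word-relative counter. -/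
lemma alt_loop : ∀ (cs : List Char) (acc : List Char) (n : Nat),
    (cs.foldl (fun (st : List Char × Int) c =>
        if c == ' ' then (st.1 ++ [c], 0)
        else (st.1 ++ [if PySem.Int.mod st.2 2 == 0 then PySem.Chars.upperChar c else c],
              st.2 + 1)) (acc, (n : Int))).1
      = acc ++ gRec cs n := by
  intro cs
  induction cs with
  | nil => simp [gRec]
  | cons c cs ih =>
    intro acc n
    by_cases hc : c = ' '
    · subst hc
      simp only [List.foldl_cons, beq_self_eq_true, if_true]
      have h := ih (acc ++ [' ']) 0
      rw [Nat.cast_zero] at h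
      rw [h]
      simp [gRec]
    · have hb : (c == ' ') = false := by simp [hc]
      have h1 : ((n : Int) + 1) = ((n + 1 : Nat) : Int) := by push_cast; ring
      simp only [List.foldl_cons, hb, if_false, modTwo_beq, h1, Bool.false_eq_true]
      rw [ih]
      by_cases hpar : n % 2 = 0 <;> simp [hpar, gRec, hc]

-- ===== VERDICT (by name: the statement is the Claim_ definition above) =====
theorem solution_spec : Claim_equal_solution := by
  intro s _
  unfold Spec_solution solution solution_alt
  simp only []
  rw [splitOn_eq_splitSp, outer_loop]
  have halt := alt_loop s.toList [] 0
  rw [Nat.cast_zero] at halt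
  rw [halt]
  obtain ⟨w, ws, hw⟩ := List.exists_cons_of_ne_nil (splitSp_ne_nil s.toList)
  have hj : joinTw (splitSp s.toList) = gRec s.toList 0 ++ [' '] := by
    rw [hw]; exact joinTw_splitSp s.toList 0 w ws hw
  simp only [List.nil_append]
  rw [hj, PySem.List.slice_to_neg_one, List.dropLast_concat]
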